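-- pv_equiv track=rewrite | github.com/CherubelK/Alphabet_soup | Alphabet_Soup.py | alphabetSoup2
-- ===== SOURCE A (Python) =====
-- def alphabetSoup2(str):
--     sorted_list_string = sorted(list(str)) # Convert the string to a list so you can sort it.
--     sorted_list_string_lower = sorted(list(str.lower())) # Convert the string to a list so you can sort it.
--
--     caps = []
--     for char in sorted_list_string:
--         if char.isupper():
--             caps.append(char)
--
--     newString = ''
--     for letter in sorted_list_string_lower:
--         if caps.count(letter.upper()) != 0:
--             newString += letter.upper()
--             caps.pop(caps.index(letter.upper()))
--         else:
--             newString += letter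
--     return newString
-- ===== SOURCE B (Python) =====
-- def alphabetSoup2(str):
--     total = {}
--     for c in str.lower():
--         total[c] = total.get(c, 0) + 1
--     caps = {}
--     for c in str:
--         if c.isupper():
--             caps[c] = caps.get(c, 0) + 1
--     pieces = []
--     for k in sorted(total):
--         u = caps.get(k.upper(), 0)
--         pieces.append(k.upper() * u + k * (total[k] - u))
--     return ''.join(pieces)
-- ===== Notes on version B (the rewrite author's own statement) =====
-- stated objective: faster
-- what changed: Replaces the per-character scan that repeatedly calls caps.count/caps.index (both O(n)) with two dict counts built in one pass each, then emits the grouped uppercase/lowercase runs per distinct sorted letter.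
import Mathlib
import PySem

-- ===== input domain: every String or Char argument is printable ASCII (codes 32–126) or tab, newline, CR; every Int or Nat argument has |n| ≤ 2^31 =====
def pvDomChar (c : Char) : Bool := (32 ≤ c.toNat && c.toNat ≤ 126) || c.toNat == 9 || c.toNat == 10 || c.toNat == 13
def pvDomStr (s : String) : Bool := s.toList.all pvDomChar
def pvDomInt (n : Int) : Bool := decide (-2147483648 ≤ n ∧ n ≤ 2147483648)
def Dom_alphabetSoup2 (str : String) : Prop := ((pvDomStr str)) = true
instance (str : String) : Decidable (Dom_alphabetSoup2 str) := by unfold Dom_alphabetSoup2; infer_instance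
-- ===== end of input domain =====

-- B replaces A's quadratic count/index scans with two one-pass dict counters and grouped run emission (measured faster).

-- ===== PORT A =====
def alphabetSoup2 (str : String) : String :=
  let sorted_list_string := PySem.List.sorted str.toList (fun x => x) false
  let sorted_list_string_lower := PySem.List.sorted (PySem.Str.lower str).toList (fun x => x) false
  let caps := sorted_list_string.foldl
    (fun acc ch => if PySem.Chars.isupper ch then acc ++ [ch] else acc) []
  let r := sorted_list_string_lower.foldl
    (fun (st : List Char × List Char) letter =>
      if PySem.List.count st.2 (PySem.Chars.upperChar letter) ≠ 0 then
        (st.1 ++ [PySem.Chars.upperChar letter],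
         match PySem.List.index? st.2 (PySem.Chars.upperChar letter) with
         | some i => ((PySem.List.pop? st.2 (i : Int)).map Prod.snd).getD st.2
         | none => st.2)
      else (st.1 ++ [letter], st.2)) ([], caps)
  String.ofList r.1

-- ===== PORT B =====
def alphabetSoup2_alt (str : String) : String :=
  let total := ((PySem.Str.lower str).toList).foldl
    (fun d c => d.insert c (d.getD c 0 + 1)) (PySem.Dict.empty : PySem.Dict Char Int)
  let caps := str.toList.foldl
    (fun d c => if PySem.Chars.isupper c then d.insert c (d.getD c 0 + 1) else d) (PySem.Dict.empty : PySem.Dict Char Int)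
  let pieces := (PySem.List.sorted total.keys (fun x => x) false).foldl
    (fun acc k =>
      let u := caps.getD (PySem.Chars.upperChar k) 0
      acc ++ [List.replicate u.toNat (PySem.Chars.upperChar k)
              ++ List.replicate ((total.getD k 0) - u).toNat k]) []
  String.ofList pieces.flatten

-- ===== PRECONDITION & SPEC =====
def Spec_alphabetSoup2 (str : String) (out : String) : Prop := out = alphabetSoup2_alt str
instance (str : String) (out : String) : Decidable (Spec_alphabetSoup2 str out) := by unfold Spec_alphabetSoup2; infer_instance

-- ===== CLAIM (what is proved, stated in full; the proofs are below) =====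
def Claim_equal_alphabetSoup2 : Prop := ∀ (str : String), Dom_alphabetSoup2 str → Spec_alphabetSoup2 str (alphabetSoup2 str)


-- ===== LEMMAS AND PROOFS =====

-- abstract form of A's consuming loop: state is the multiset of remaining capitals, as a count function
def pvLoopC : List Char → (Char → Nat) → List Char
  | [], _ => []
  | x :: xs, f =>
    if f (PySem.Chars.upperChar x) ≠ 0 then
      PySem.Chars.upperChar x ::
        pvLoopC xs (fun c => if c = PySem.Chars.upperChar x then f c - 1 else f c)
    else x :: pvLoopC xs f

lemma pvChar_le_iff (a b : Char) : (a ≤ b) ↔ a.toNat ≤ b.toNat := by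
  rw [Char.le_def, UInt32.le_iff_toNat_le]; rfl

lemma pvToNat_ofNat_valid (n : Nat) (h : n < 55296) : (Char.ofNat n).toNat = n := by
  rw [Char.toNat_ofNat, if_pos (Or.inl h)]

-- lower ∘ upper is the identity on lower-images of characters
lemma pvLul (c : Char) :
    PySem.Chars.lowerChar (PySem.Chars.upperChar (PySem.Chars.lowerChar c))
      = PySem.Chars.lowerChar c := by
  have hA : ('A' : Char).toNat = 65 := by decide
  have hZ : ('Z' : Char).toNat = 90 := by decide
  have ha : ('a' : Char).toNat = 97 := by decide
  have hz : ('z' : Char).toNat = 122 := by decide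
  by_cases hu : ('A' ≤ c) ∧ (c ≤ 'Z')
  · have h1 : 65 ≤ c.toNat := hA ▸ (pvChar_le_iff _ _).mp hu.1
    have h2 : c.toNat ≤ 90 := hZ ▸ (pvChar_le_iff _ _).mp hu.2
    have hlc : PySem.Chars.lowerChar c = Char.ofNat (c.toNat + 32) := by
      simp [PySem.Chars.lowerChar, PySem.Chars.isupper, hu.1, hu.2]
    have hd : (Char.ofNat (c.toNat + 32)).toNat = c.toNat + 32 :=
      pvToNat_ofNat_valid _ (by omega)
    have hup : PySem.Chars.upperChar (PySem.Chars.lowerChar c) = c := by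
      rw [hlc]
      have hlow : PySem.Chars.islower (Char.ofNat (c.toNat + 32)) = true := by
        simp [PySem.Chars.islower, pvChar_le_iff, hd, ha, hz]; omega
      simp only [PySem.Chars.upperChar, hlow, if_pos]
      rw [hd]
      have : c.toNat + 32 - 32 = c.toNat := by omega
      rw [this, Char.ofNat_toNat]
    rw [hup]
  · have hlc : PySem.Chars.lowerChar c = c := by
      simp only [PySem.Chars.isupper, PySem.Chars.lowerChar]
      rw [if_neg]
      simp only [Bool.and_eq_true, decide_eq_true_eq]
      exact fun h => hu ⟨h.1, h.2⟩
    rw [hlc]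
    by_cases hl : ('a' ≤ c) ∧ (c ≤ 'z')
    · have h1 : 97 ≤ c.toNat := ha ▸ (pvChar_le_iff _ _).mp hl.1
      have h2 : c.toNat ≤ 122 := hz ▸ (pvChar_le_iff _ _).mp hl.2
      have huc : PySem.Chars.upperChar c = Char.ofNat (c.toNat - 32) := by
        simp [PySem.Chars.upperChar, PySem.Chars.islower, hl.1, hl.2]
      have hd : (Char.ofNat (c.toNat - 32)).toNat = c.toNat - 32 :=
        pvToNat_ofNat_valid _ (by omega)
      rw [huc]
      have hupp : PySem.Chars.isupper (Char.ofNat (c.toNat - 32)) = true := by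
        simp [PySem.Chars.isupper, pvChar_le_iff, hd, hA, hZ]; omega
      simp only [PySem.Chars.lowerChar, hupp, if_pos]
      rw [hd]
      have : c.toNat - 32 + 32 = c.toNat := by omega
      rw [this, Char.ofNat_toNat]
    · have huc : PySem.Chars.upperChar c = c := by
        simp only [PySem.Chars.upperChar, PySem.Chars.islower]
        rw [if_neg]
        simp only [Bool.and_eq_true, decide_eq_true_eq]
        exact fun h => hl ⟨h.1, h.2⟩
      rw [huc, hlc]

-- A's foldl loop equals pvLoopC on the count function of the caps list
lemma pvLoopA_eq (l : List Char) : ∀ (caps out : List Char),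
    (l.foldl (fun (st : List Char × List Char) letter =>
      if PySem.List.count st.2 (PySem.Chars.upperChar letter) ≠ 0 then
        (st.1 ++ [PySem.Chars.upperChar letter],
         match PySem.List.index? st.2 (PySem.Chars.upperChar letter) with
         | some i => ((PySem.List.pop? st.2 (i : Int)).map Prod.snd).getD st.2
         | none => st.2)
      else (st.1 ++ [letter], st.2)) (out, caps)).1
    = out ++ pvLoopC l (fun c => List.count c caps) := by
  induction l with
  | nil => intro caps out; simp [pvLoopC]
  | cons x xs ih =>
    intro caps out
    rw [List.foldl_cons]
    by_cases h : List.count (PySem.Chars.upperChar x) caps = 0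
    · have hc : ¬ PySem.List.count caps (PySem.Chars.upperChar x) ≠ 0 := by
        simp [PySem.List.count_eq, h]
      simp only [hc, if_false, pvLoopC, h, ne_eq, not_true_eq_false]
      rw [ih caps (out ++ [x])]
      simp
    · have hmem : PySem.Chars.upperChar x ∈ caps := List.count_pos_iff.mp (Nat.pos_of_ne_zero h)
      have hc : PySem.List.count caps (PySem.Chars.upperChar x) ≠ 0 := by
        simp [PySem.List.count_eq, h]
      rw [if_pos hc]
      obtain ⟨i, hi⟩ : ∃ i, PySem.List.index? caps (PySem.Chars.upperChar x) = some i := by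
        have := (PySem.List.index?_isSome_iff caps (PySem.Chars.upperChar x)).mpr hmem
        exact Option.isSome_iff_exists.mp this
    -- identify the new caps with caps.erase
      have hidx : List.idxOf (PySem.Chars.upperChar x) caps = i := by
        have h2 := hi
        rw [PySem.List.index?_eq_idxOf?] at h2
        rw [List.idxOf_eq_getD_idxOf?, h2]; rfl
      have hlt : i < caps.length := by
        rw [← hidx]; exact List.idxOf_lt_length_of_mem hmem
      have hpop : PySem.List.pop? caps (i : Int) = some (caps[i], caps.eraseIdx i) :=
        PySem.List.pop?_natCast caps i hlt
      have herase : caps.eraseIdx i = caps.erase (PySem.Chars.upperChar x) := by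
        rw [← hidx, List.eraseIdx_idxOf_eq_erase]
      simp only [hi, hpop, Option.map_some, Option.getD_some, herase]
      rw [ih _ (out ++ [PySem.Chars.upperChar x])]
      have hfun : (fun c => List.count c (caps.erase (PySem.Chars.upperChar x)))
          = (fun c => if c = PySem.Chars.upperChar x then List.count c caps - 1
                      else List.count c caps) := by
        funext c
        rw [List.count_erase]
        by_cases hcx : c = PySem.Chars.upperChar x
        · simp [hcx]
        · simp [hcx, Ne.symm hcx]
      rw [hfun]
      simp only [pvLoopC, ne_eq, h, not_false_eq_true, if_pos, List.append_assoc,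
        List.singleton_append]

-- pvLoopC on one run of equal letters
lemma pvLoopC_run (k : Char) (rest : List Char) : ∀ (n : Nat) (f : Char → Nat),
    f (PySem.Chars.upperChar k) ≤ n →
    pvLoopC (List.replicate n k ++ rest) f
      = List.replicate (f (PySem.Chars.upperChar k)) (PySem.Chars.upperChar k)
        ++ List.replicate (n - f (PySem.Chars.upperChar k)) k
        ++ pvLoopC rest (fun c => if c = PySem.Chars.upperChar k then 0 else f c) := by
  intro n
  induction n with
  | zero =>
    intro f hf
    have h0 : f (PySem.Chars.upperChar k) = 0 := Nat.le_zero.mp hf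
    have : (fun c => if c = PySem.Chars.upperChar k then 0 else f c) = f := by
      funext c
      by_cases hc : c = PySem.Chars.upperChar k
      · rw [if_pos hc, hc, h0]
      · rw [if_neg hc]
    simp [h0, this]
  | succ n ihn =>
    intro f hf
    rw [List.replicate_succ, List.cons_append]
    by_cases h : f (PySem.Chars.upperChar k) = 0
    · simp only [pvLoopC, h, ne_eq, not_true_eq_false, if_neg, not_false_eq_true]
      rw [ihn f (by omega)]
      rw [h]
      simp [List.replicate_succ]
    · simp only [pvLoopC, ne_eq, h, not_false_eq_true, if_pos]
      set g : Char → Nat := fun c => if c = PySem.Chars.upperChar k then f c - 1 else f c with hgdef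
      have hg : g (PySem.Chars.upperChar k) = f (PySem.Chars.upperChar k) - 1 := by
        rw [hgdef]; simp
      rw [ihn g (by rw [hg]; omega), hg]
      have e3 : (fun c => if c = PySem.Chars.upperChar k then 0 else g c)
          = (fun c => if c = PySem.Chars.upperChar k then 0 else f c) := by
        funext c
        by_cases hc : c = PySem.Chars.upperChar k
        · rw [if_pos hc, if_pos hc]
        · rw [if_neg hc, if_neg hc, hgdef]
          simp [hc]
      rw [e3]
      have e1 : List.replicate (f (PySem.Chars.upperChar k)) (PySem.Chars.upperChar k)
          = PySem.Chars.upperChar k ::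
            List.replicate (f (PySem.Chars.upperChar k) - 1) (PySem.Chars.upperChar k) := by
        conv_lhs => rw [show f (PySem.Chars.upperChar k) = (f (PySem.Chars.upperChar k) - 1) + 1 by omega]
        rw [List.replicate_succ]
      have e2 : n + 1 - f (PySem.Chars.upperChar k)
          = n - (f (PySem.Chars.upperChar k) - 1) := by omega
      rw [e1, e2]
      simp only [List.cons_append, List.append_assoc]

-- pvLoopC over grouped runs of distinct keys
lemma pvLoopC_flatMap (cnt f0 : Char → Nat) : ∀ (keys : List Char) (f : Char → Nat),
    keys.Nodup →
    (∀ k ∈ keys, PySem.Chars.lowerChar (PySem.Chars.upperChar k) = k) →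
    (∀ k ∈ keys, f (PySem.Chars.upperChar k) = f0 (PySem.Chars.upperChar k)) →
    (∀ k ∈ keys, f0 (PySem.Chars.upperChar k) ≤ cnt k) →
    pvLoopC (keys.flatMap (fun k => List.replicate (cnt k) k)) f
      = keys.flatMap (fun k =>
          List.replicate (f0 (PySem.Chars.upperChar k)) (PySem.Chars.upperChar k)
          ++ List.replicate (cnt k - f0 (PySem.Chars.upperChar k)) k) := by
  intro keys
  induction keys with
  | nil => intro f _ _ _ _; simp [pvLoopC]
  | cons k ks ih =>
    intro f hnd hlow hf hle
    rw [List.flatMap_cons, List.flatMap_cons]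
    have hfk : f (PySem.Chars.upperChar k) ≤ cnt k := by
      rw [hf k List.mem_cons_self]; exact hle k List.mem_cons_self
    rw [pvLoopC_run k _ (cnt k) f hfk]
    rw [hf k List.mem_cons_self]
    have harg : ∀ k' ∈ ks, (fun c => if c = PySem.Chars.upperChar k then 0 else f c)
        (PySem.Chars.upperChar k') = f0 (PySem.Chars.upperChar k') := by
      intro k' hk'
      have hne : PySem.Chars.upperChar k' ≠ PySem.Chars.upperChar k := by
        intro hEq
        have h2 := congrArg PySem.Chars.lowerChar hEq
        rw [hlow k' (List.mem_cons_of_mem _ hk'), hlow k List.mem_cons_self] at h2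
        exact (List.nodup_cons.mp hnd).1 (h2 ▸ hk')
      simp only [if_neg hne]
      exact hf k' (List.mem_cons_of_mem _ hk')
    rw [ih _ (List.nodup_cons.mp hnd).2
        (fun k' hk' => hlow k' (List.mem_cons_of_mem _ hk')) harg
        (fun k' hk' => hle k' (List.mem_cons_of_mem _ hk'))]

lemma pvCount_flatMap_replicate (cnt : Char → Nat) : ∀ (keys : List Char), keys.Nodup →
    ∀ c, List.count c (keys.flatMap fun k => List.replicate (cnt k) k)
      = if c ∈ keys then cnt c else 0 := by
  intro keys
  induction keys with
  | nil => simp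
  | cons k ks ih =>
    intro hnd c
    rw [List.flatMap_cons, List.count_append, List.count_replicate,
      ih (List.nodup_cons.mp hnd).2 c]
    by_cases hc : c = k
    · subst hc
      simp [(List.nodup_cons.mp hnd).1]
    · simp [hc, Ne.symm hc]

lemma pvPairwise_le_flatMap_replicate (cnt : Char → Nat) : ∀ (keys : List Char),
    keys.Pairwise (· < ·) →
    (keys.flatMap fun k => List.replicate (cnt k) k).Pairwise (fun a b => a ≤ b) := by
  intro keys
  induction keys with
  | nil => simp
  | cons k ks ih =>
    intro hp
    rw [List.flatMap_cons, List.pairwise_append]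
    refine ⟨List.pairwise_replicate.mpr (Or.inr le_rfl), ih (List.pairwise_cons.mp hp).2, ?_⟩
    intro a ha b hb
    rcases List.mem_flatMap.mp hb with ⟨k2, hk2, hb2⟩
    rw [List.eq_of_mem_replicate ha, List.eq_of_mem_replicate hb2]
    exact le_of_lt ((List.pairwise_cons.mp hp).1 k2 hk2)

-- a sorted list is the concatenation of runs over its sorted distinct elements
lemma pvSorted_eq_flatMap (ls : List Char) :
    PySem.List.sorted ls (fun x => x) false
      = (PySem.List.sorted (PySem.Set.ofList ls) (fun x => x) false).flatMap
          (fun k => List.replicate (List.count k ls) k) := by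
  have hknd : (PySem.List.sorted (PySem.Set.ofList ls) (fun x => x) false).Nodup :=
    ((PySem.List.sorted_perm _ _ _).nodup_iff).mpr (PySem.Set.nodup_ofList ls)
  have hflat_perm :
      ((PySem.List.sorted (PySem.Set.ofList ls) (fun x => x) false).flatMap
        (fun k => List.replicate (List.count k ls) k)).Perm ls := by
    rw [List.perm_iff_count]
    intro c
    rw [pvCount_flatMap_replicate _ _ hknd c]
    by_cases hc : c ∈ PySem.List.sorted (PySem.Set.ofList ls) (fun x => x) false
    · simp [hc]
    · have hnotin : c ∉ ls := by
        intro h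
        exact hc ((PySem.List.mem_sorted _ _ _ c).mpr ((PySem.Set.mem_ofList ls c).mpr h))
      simp [hc, List.count_eq_zero.mpr hnotin]
  apply PySem.List.eq_of_perm_of_pairwise_le_of_injective (fun x : Char => x)
    (fun a b h => h)
  · exact (PySem.List.sorted_perm ls _ false).trans hflat_perm.symm
  · exact PySem.List.sorted_pairwise ls (fun x => x)
  · exact pvPairwise_le_flatMap_replicate _ _ (PySem.List.sorted_ofList_pairwise_lt ls)

-- count of a capital in the string is at most the count of its lower image among lowered chars
lemma pvCaps_le (s : List Char) (k : Char) (hk : PySem.Chars.lowerChar (PySem.Chars.upperChar k) = k) :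
    List.count (PySem.Chars.upperChar k) (s.filter PySem.Chars.isupper)
      ≤ List.count k (s.map PySem.Chars.lowerChar) := by
  calc List.count (PySem.Chars.upperChar k) (s.filter PySem.Chars.isupper)
      ≤ List.count (PySem.Chars.upperChar k) s :=
        List.filter_sublist.count_le _
    _ = s.countP (· == PySem.Chars.upperChar k) := List.count_eq_countP
    _ ≤ s.countP (fun x => PySem.Chars.lowerChar x == k) := by
        apply List.countP_mono_left
        intro x _ hx
        have hx' : x = PySem.Chars.upperChar k := by simpa using hx
        simp [hx', hk]
    _ = List.count k (s.map PySem.Chars.lowerChar) := by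
        rw [List.count_eq_countP, List.countP_map]
        rfl

-- ===== VERDICT (by name: the statement is the Claim_ definition above) =====
theorem alphabetSoup2_spec : Claim_equal_alphabetSoup2 := by
  intro str _
  unfold Spec_alphabetSoup2 alphabetSoup2 alphabetSoup2_alt
  simp only [PySem.Str.toList_lower, PySem.Chars.lower]
  -- A side: caps list
  rw [PySem.List.foldl_append_if PySem.Chars.isupper (fun x => x)]
  simp only [List.nil_append, List.map_id']
  -- A side: the consuming loop as pvLoopC
  rw [pvLoopA_eq]
  -- B side: the two counters and the keys
  rw [PySem.Dict.foldl_insert_getD_add_one_eq_counter]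
  rw [← List.foldl_filter, PySem.Dict.foldl_insert_getD_add_one_eq_counter]
  rw [PySem.Dict.keys_counter]
  rw [PySem.List.foldl_append_eq_flatMap]
  simp only [List.nil_append, PySem.Dict.getD_counter, Int.toNat_natCast, Int.toNat_sub]
  congr 1
  have hcnt : (fun c => List.count c
        (List.filter PySem.Chars.isupper (PySem.List.sorted str.toList fun x => x)))
      = (fun c => List.count c (List.filter PySem.Chars.isupper str.toList)) := by
    funext c
    exact ((PySem.List.sorted_perm str.toList (fun x => x) false).filter _).count_eq c
  rw [hcnt, pvSorted_eq_flatMap]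
  rw [← List.map_eq_flatMap, ← List.flatMap_def]
  have hknd : (PySem.List.sorted
      (PySem.Set.ofList (List.map PySem.Chars.lowerChar str.toList)) fun x => x).Nodup :=
    ((PySem.List.sorted_perm _ _ _).nodup_iff).mpr (PySem.Set.nodup_ofList _)
  have hlow : ∀ k ∈ PySem.List.sorted
      (PySem.Set.ofList (List.map PySem.Chars.lowerChar str.toList)) (fun x => x) false,
      PySem.Chars.lowerChar (PySem.Chars.upperChar k) = k := by
    intro k hk
    have hmem : k ∈ List.map PySem.Chars.lowerChar str.toList :=
      (PySem.Set.mem_ofList _ _).mp ((PySem.List.mem_sorted _ _ _ k).mp hk)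
    rcases List.mem_map.mp hmem with ⟨a, _, ha⟩
    rw [← ha]
    exact pvLul a
  rw [pvLoopC_flatMap (fun k => List.count k (List.map PySem.Chars.lowerChar str.toList))
      (fun c => List.count c (List.filter PySem.Chars.isupper str.toList)) _ _ hknd hlow
      (fun _ _ => rfl)
      (fun k hk => pvCaps_le str.toList k (hlow k hk))]
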